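-- pv_equiv track=rewrite | github.com/JacobBolano/bril | examples/task2/const_prop.py | cfg_intersect_maps
-- ===== SOURCE A (Python) =====
-- def cfg_intersect_maps(predecessor_facts):
--     # merge facts
--
--     if not predecessor_facts:
--         return {}
--
--     # check if any of the predecessor facts are empty
--     if any(d == {} for d in predecessor_facts):
--         return {}
--
--     potential_output = {}
--
--     for fact in predecessor_facts:
--         for key, value in fact.items():
--             if value == '?':
--                 potential_output[key] = '?'
--             else:
--                 # if we already saw this key before
--                 if key in potential_output:
--                     # if the values are different, this variable is no longer constant
--                     if potential_output[key] != value: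
--                         potential_output[key] = '?'
--                     # otherwise we keep it
--                 else:
--                     # add to the map
--                     potential_output[key] = value
--     return potential_output
-- ===== SOURCE B (Python) =====
-- def cfg_intersect_maps(predecessor_facts):
--     # Gather-then-reduce: first collect each key's distinct values across all
--     # facts, then decide once per key: a single non-'?' value stays, else '?'.
--     if not predecessor_facts:
--         return {}
--     if any(d == {} for d in predecessor_facts):
--         return {}
--     values_by_key = {}
--     for fact in predecessor_facts:
--         for key, value in fact.items():
--             values_by_key.setdefault(key, set()).add(value)
--     return {key: next(iter(vals)) if len(vals) == 1 and '?' not in vals else '?'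
--             for key, vals in values_by_key.items()}
-- ===== Notes on version B (the rewrite author's own statement) =====
-- stated objective: alternative
-- what changed: Replaces A's single interleaved loop that decides constancy while accumulating (compare-and-overwrite per pair) with two shaped passes: first gather each key's set of distinct values across all facts, then reduce each set once ('?' or >1 distinct value => '?', else the single value).
import Mathlib
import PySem

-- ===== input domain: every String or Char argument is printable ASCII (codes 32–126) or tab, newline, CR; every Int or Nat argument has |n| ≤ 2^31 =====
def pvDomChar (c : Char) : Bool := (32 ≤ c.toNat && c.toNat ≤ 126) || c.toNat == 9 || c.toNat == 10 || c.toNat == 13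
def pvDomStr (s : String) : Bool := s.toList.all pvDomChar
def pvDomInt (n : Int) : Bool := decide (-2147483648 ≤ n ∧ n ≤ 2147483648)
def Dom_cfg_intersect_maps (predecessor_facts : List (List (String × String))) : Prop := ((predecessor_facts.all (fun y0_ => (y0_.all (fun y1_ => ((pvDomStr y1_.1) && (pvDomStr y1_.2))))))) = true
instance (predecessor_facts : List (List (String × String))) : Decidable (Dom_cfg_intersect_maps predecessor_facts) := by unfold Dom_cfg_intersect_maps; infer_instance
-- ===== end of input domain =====

-- B replaces A's interleaved accumulate-and-decide loop by two shaped passes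
-- (gather each key's value set, then reduce each set once); objective: alternative decomposition, same cost.

-- ===== PORT A =====
def cfg_intersect_maps (predecessor_facts : List (List (String × String))) : List (String × String) :=
  if predecessor_facts = [] then []
  else if predecessor_facts.any (fun d => d = []) then []
  else
    (predecessor_facts.foldl (fun po fact =>
        fact.foldl (fun po kv =>
          if kv.2 = "?" then po.insert kv.1 "?"
          else if po.contains kv.1 then
            (if po.get? kv.1 ≠ some kv.2 then po.insert kv.1 "?" else po)
          else po.insert kv.1 kv.2) po)
      (PySem.Dict.empty : PySem.Dict String String)).items

-- ===== PORT B =====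
-- the conditional expression of Source B's final dict comprehension
def pvReduce (vs : PySem.Set String) : String :=
  if vs.length = 1 ∧ "?" ∉ vs then vs.headI else "?"

-- the comprehension body: key ↦ reduced value
def pvF (p : String × PySem.Set String) : String × String := (p.1, pvReduce p.2)

def cfg_intersect_maps_alt (predecessor_facts : List (List (String × String))) : List (String × String) :=
  if predecessor_facts = [] then []
  else if predecessor_facts.any (fun d => d = []) then []
  else
    ((predecessor_facts.foldl (fun t fact =>
        fact.foldl (fun t kv =>
          t.modify kv.1 PySem.Set.empty (fun s => PySem.Set.add s kv.2)) t)
      (PySem.Dict.empty : PySem.Dict String (PySem.Set String))).items).map pvF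

-- ===== PRECONDITION & SPEC =====
def Spec_cfg_intersect_maps (predecessor_facts : List (List (String × String))) (out : List (String × String)) : Prop := out = cfg_intersect_maps_alt predecessor_facts
instance (predecessor_facts : List (List (String × String))) (out : List (String × String)) : Decidable (Spec_cfg_intersect_maps predecessor_facts out) := by unfold Spec_cfg_intersect_maps; infer_instance

-- ===== CLAIM (what is proved, stated in full; the proofs are below) =====
def Claim_equal_cfg_intersect_maps : Prop := ∀ (predecessor_facts : List (List (String × String))), Dom_cfg_intersect_maps predecessor_facts → Spec_cfg_intersect_maps predecessor_facts (cfg_intersect_maps predecessor_facts)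

-- ===== LEMMAS AND PROOFS =====

-- The simulation invariant: A's dict is the pvF-image of B's gathering table,
-- whose keys are unique and whose value sets are nonempty.
def pvInv (t : PySem.Dict String (PySem.Set String)) (po : PySem.Dict String String) : Prop :=
  po.items = t.items.map pvF ∧ t.keys.Nodup ∧ ∀ p ∈ t.items, p.2 ≠ ([] : List String)

lemma pvSet_add_ne_nil (s : PySem.Set String) (x : String) : PySem.Set.add s x ≠ [] := by
  intro h
  have hx : x ∈ PySem.Set.add s x := (PySem.Set.mem_add s x x).mpr (Or.inr rfl)
  rw [h] at hx
  simp at hx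

lemma pvReduce_of_mem_q (vs : PySem.Set String) (h : "?" ∈ vs) : pvReduce vs = "?" := by
  simp [pvReduce, h]

lemma pvReduce_singleton_self (v : String) (hv : v ≠ "?") : pvReduce [v] = v := by
  simp [pvReduce, List.headI, Ne.symm hv]

lemma pvReduce_eq_singleton (vs : PySem.Set String) (v : String) (hv : v ≠ "?")
    (h : pvReduce vs = v) : vs = [v] := by
  unfold pvReduce at h
  split at h
  · next hc =>
    obtain ⟨h1, _⟩ := hc
    match vs, h1 with
    | [a], _ => simp [List.headI] at h; simp [h]
  · exact absurd h.symm hv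

lemma pvReduce_add_q (vs : PySem.Set String) : pvReduce (PySem.Set.add vs "?") = "?" := by
  apply pvReduce_of_mem_q
  exact (PySem.Set.mem_add vs "?" "?").mpr (Or.inr rfl)

lemma pvReduce_add_ne (vs : PySem.Set String) (v : String) (hvs : vs ≠ []) (hv : v ≠ "?")
    (hne : pvReduce vs ≠ v) : pvReduce (PySem.Set.add vs v) = "?" := by
  have hnsing : vs ≠ [v] := by
    intro h; subst h
    exact hne (by simp [pvReduce, List.headI, Ne.symm hv])
  simp only [PySem.Set.add, PySem.Set.contains_eq_decide]
  split
  · next hc =>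
    have hvmem : v ∈ vs := by simpa using hc
    unfold pvReduce
    split
    · next hcnd =>
      exfalso
      obtain ⟨h1, _⟩ := hcnd
      match vs, h1 with
      | [a], _ =>
        simp at hvmem
        exact hnsing (by simp [hvmem])
    · rfl
  · unfold pvReduce
    split
    · next hcnd =>
      exfalso
      obtain ⟨h1, _⟩ := hcnd
      match vs, hvs with
      | a :: rest, _ => simp only [List.length_append, List.length_cons, List.length_nil] at h1; omega
    · rfl

lemma pvReduce_add_eq (vs : PySem.Set String) (v : String) (hv : v ≠ "?")
    (h : pvReduce vs = v) : PySem.Set.add vs v = vs := by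
  have := pvReduce_eq_singleton vs v hv h
  subst this
  simp [PySem.Set.add, PySem.Set.contains]

lemma pvKeys_eq (t : PySem.Dict String (PySem.Set String)) (po : PySem.Dict String String)
    (h : po.items = t.items.map pvF) : po.keys = t.keys := by
  simp only [PySem.Dict.keys, h, List.map_map]
  rfl

lemma pvGet?_eq (t : PySem.Dict String (PySem.Set String)) (po : PySem.Dict String String)
    (h : po.items = t.items.map pvF) (hnd : t.keys.Nodup) (k : String) :
    po.get? k = (t.get? k).map pvReduce := by
  have hpk : po.keys.Nodup := by rw [pvKeys_eq t po h]; exact hnd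
  cases hq : t.get? k with
  | none =>
    have hk : k ∉ t.keys := (PySem.Dict.get?_eq_none_iff_not_mem_keys t k).mp hq
    have : k ∉ po.keys := by rw [pvKeys_eq t po h]; exact hk
    simpa using (PySem.Dict.get?_eq_none_iff_not_mem_keys po k).mpr this
  | some vs =>
    have hm : (k, vs) ∈ t.items := PySem.Dict.mem_items_of_get?_eq_some t hq
    have hm' : (k, pvReduce vs) ∈ po.items := by
      rw [h]; exact List.mem_map_of_mem hm
    simpa using PySem.Dict.get?_of_mem_items po hm' hpk

-- one pair step preserves the invariant
lemma pvStep (t : PySem.Dict String (PySem.Set String)) (po : PySem.Dict String String)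
    (kv : String × String) (h : pvInv t po) :
    pvInv (t.modify kv.1 PySem.Set.empty (fun s => PySem.Set.add s kv.2))
      (if kv.2 = "?" then po.insert kv.1 "?"
       else if po.contains kv.1 then
         (if po.get? kv.1 ≠ some kv.2 then po.insert kv.1 "?" else po)
       else po.insert kv.1 kv.2) := by
  obtain ⟨hit, hnd, hne⟩ := h
  obtain ⟨k, v⟩ := kv
  have hmod : t.modify k PySem.Set.empty (fun s => PySem.Set.add s v)
      = t.insert k (PySem.Set.add (t.getD k PySem.Set.empty) v) := rfl
  rw [hmod]
  have hget := pvGet?_eq t po hit hnd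
  have hkeys := pvKeys_eq t po hit
  have hcont : po.contains k = t.contains k := by
    simp [PySem.Dict.contains_eq_decide_mem_keys, hkeys]
  refine ⟨?_, PySem.Dict.nodup_keys_insert _ _ _ hnd, ?_⟩
  · -- items relation
    cases hq : t.get? k with
    | none =>
      have htc : t.contains k = false := by
        simp [PySem.Dict.contains_eq_isSome_get?, hq]
      have hpc : po.contains k = false := by rw [hcont]; exact htc
      have hgd : t.getD k PySem.Set.empty = PySem.Set.empty :=
        PySem.Dict.getD_of_get?_eq_none t PySem.Set.empty hq
      rw [hgd, PySem.Dict.items_insert_of_not_contains _ _ htc]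
      by_cases hv : v = "?"
      · subst hv
        rw [if_pos rfl, PySem.Dict.items_insert_of_not_contains _ _ hpc, hit]
        simp [pvF, pvReduce_of_mem_q ["?"] (by simp)]
      · rw [if_neg hv, hpc, if_neg (by simp),
          PySem.Dict.items_insert_of_not_contains _ _ hpc, hit]
        simp [pvF, pvReduce_singleton_self v hv]
    | some vs =>
      have htc : t.contains k = true := by
        simp [PySem.Dict.contains_eq_isSome_get?, hq]
      have hpc : po.contains k = true := by rw [hcont]; exact htc
      have hgd : t.getD k PySem.Set.empty = vs :=
        PySem.Dict.getD_of_get?_eq_some t PySem.Set.empty hq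
      have hvs_ne : vs ≠ [] := hne _ (PySem.Dict.mem_items_of_get?_eq_some t hq)
      have hpog : po.get? k = some (pvReduce vs) := by rw [hget k, hq]; rfl
      have hpoint : ∀ p ∈ t.items, p.1 = k → p.2 = vs := by
        intro p hp hpk
        have hp' : (k, p.2) ∈ t.items := by
          have hpe : (p.1, p.2) ∈ t.items := by simpa using hp
          rwa [hpk] at hpe
        have := PySem.Dict.get?_of_mem_items t hp' hnd
        rw [hq] at this; exact (Option.some_inj.mp this).symm
      rw [hgd, PySem.Dict.items_insert_of_contains _ _ htc]
      by_cases hv : v = "?"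
      · subst hv
        rw [if_pos rfl, PySem.Dict.items_insert_of_contains _ _ hpc, hit]
        simp only [List.map_map]
        apply List.map_congr_left
        intro p hp
        by_cases hpk : p.1 = k
        · have hpvs := hpoint p hp hpk
          simp [Function.comp, pvF, hpk, hpvs, pvReduce_add_q]
        · simp [Function.comp, pvF, hpk]
      · by_cases hdiff : pvReduce vs = v
        · -- values agree: A keeps its dict, B's add is a no-op
          have hkeep : ¬ (po.get? k ≠ some v) := by rw [hpog, hdiff]; simp
          rw [if_neg hv, hpc, if_pos rfl, if_neg hkeep, hit,
            pvReduce_add_eq vs v hv hdiff]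
          simp only [List.map_map]
          apply List.map_congr_left
          intro p hp
          by_cases hpk : p.1 = k
          · have hpvs := hpoint p hp hpk
            simp [Function.comp, pvF, hpk, hpvs]
          · simp [Function.comp, pvF, hpk]
        · have hch : po.get? k ≠ some v := by rw [hpog]; simp [hdiff]
          rw [if_neg hv, hpc, if_pos rfl, if_pos hch,
            PySem.Dict.items_insert_of_contains _ _ hpc, hit]
          simp only [List.map_map]
          apply List.map_congr_left
          intro p hp
          by_cases hpk : p.1 = k
          · have hpvs := hpoint p hp hpk
            simp [Function.comp, pvF, hpk, hpvs, pvReduce_add_ne vs v hvs_ne hv hdiff]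
          · simp [Function.comp, pvF, hpk]
  · -- nonempty value sets are preserved
    intro p hp
    rcases (PySem.Dict.mem_items_insert _ _ _ _).mp hp with hnew | ⟨hold, _⟩
    · rw [hnew]; exact pvSet_add_ne_nil _ _
    · exact hne p hold

lemma pvFold_inner (l : List (String × String)) (t : PySem.Dict String (PySem.Set String))
    (po : PySem.Dict String String) (h : pvInv t po) :
    pvInv (l.foldl (fun t kv => t.modify kv.1 PySem.Set.empty (fun s => PySem.Set.add s kv.2)) t)
      (l.foldl (fun po kv =>
          if kv.2 = "?" then po.insert kv.1 "?"
          else if po.contains kv.1 then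
            (if po.get? kv.1 ≠ some kv.2 then po.insert kv.1 "?" else po)
          else po.insert kv.1 kv.2) po) := by
  induction l generalizing t po with
  | nil => exact h
  | cons kv rest ih => exact ih _ _ (pvStep t po kv h)

lemma pvFold_outer (facts : List (List (String × String)))
    (t : PySem.Dict String (PySem.Set String)) (po : PySem.Dict String String)
    (h : pvInv t po) :
    pvInv (facts.foldl (fun t fact =>
        fact.foldl (fun t kv => t.modify kv.1 PySem.Set.empty (fun s => PySem.Set.add s kv.2)) t) t)
      (facts.foldl (fun po fact =>
        fact.foldl (fun po kv =>
          if kv.2 = "?" then po.insert kv.1 "?"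
          else if po.contains kv.1 then
            (if po.get? kv.1 ≠ some kv.2 then po.insert kv.1 "?" else po)
          else po.insert kv.1 kv.2) po) po) := by
  induction facts generalizing t po with
  | nil => exact h
  | cons fact rest ih => exact ih _ _ (pvFold_inner fact t po h)

lemma pvInv_empty : pvInv (PySem.Dict.empty : PySem.Dict String (PySem.Set String))
    (PySem.Dict.empty : PySem.Dict String String) := by
  refine ⟨by decide, by decide, by decide⟩

-- ===== VERDICT (by name: the statement is the Claim_ definition above) =====
theorem cfg_intersect_maps_spec : Claim_equal_cfg_intersect_maps := by
  intro pf _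
  unfold Spec_cfg_intersect_maps cfg_intersect_maps cfg_intersect_maps_alt
  split
  · rfl
  · split
    · rfl
    · exact (pvFold_outer pf _ _ pvInv_empty).1
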